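-- pv_equiv track=rewrite | github.com/kimxminsu/practice-algorithm | 프로그래머스/0/181890. 왼쪽 오른쪽/왼쪽 오른쪽.py | solution
-- ===== SOURCE A (Python) =====
-- def solution(str_list):
--     answer = []
--     flag = 0
--     for i in range(len(str_list)):
--         if flag == 1:
--             break
--         if str_list[i] == "l":
--             flag = 1
--             answer = str_list[:i]
--         if str_list[i] == "r":
--             flag = 1
--             answer = str_list[i+1:]
--     return answer
-- ===== SOURCE B (Python) =====
-- def solution(str_list):
--     li = str_list.index("l") if "l" in str_list else None
--     ri = str_list.index("r") if "r" in str_list else None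
--     if li is None:
--         return [] if ri is None else str_list[ri + 1:]
--     if ri is None or li < ri:
--         return str_list[:li]
--     return str_list[ri + 1:]
-- ===== Notes on version B (the rewrite author's own statement) =====
-- stated objective: simpler
-- what changed: Replaced A's flag-driven early-break scan over indices by computing the first occurrence index of 'l' and of 'r' with list.index and deciding by which index is smaller (prefix before the 'l' vs suffix after the 'r', [] if neither occurs).
import Mathlib
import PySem

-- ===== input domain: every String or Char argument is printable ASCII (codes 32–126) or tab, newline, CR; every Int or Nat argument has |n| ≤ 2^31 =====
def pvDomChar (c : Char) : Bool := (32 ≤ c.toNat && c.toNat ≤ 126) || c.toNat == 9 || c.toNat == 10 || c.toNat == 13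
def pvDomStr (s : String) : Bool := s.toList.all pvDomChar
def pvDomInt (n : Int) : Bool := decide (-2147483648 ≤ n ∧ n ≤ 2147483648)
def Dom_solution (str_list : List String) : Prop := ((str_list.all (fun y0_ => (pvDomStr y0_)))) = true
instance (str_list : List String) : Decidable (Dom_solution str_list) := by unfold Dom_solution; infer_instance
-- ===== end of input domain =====

-- B replaces A's flag-driven early-break scan by the two first-occurrence indices of "l" and "r"
-- and a min-of-indices decision (objective: simpler).

-- ===== PORT A =====
-- loop body of A's for-loop (answer, flag) over i in range(len(str_list))
def solution_body (str_list : List String) (st : List String × Int) (i : Int) : List String × Int :=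
  if st.2 = 1 then st
  else
    let st1 := if PySem.List.pyGetD str_list i "" = "l"
      then (PySem.List.slice str_list none (some i), (1 : Int))
      else st
    if PySem.List.pyGetD str_list i "" = "r"
      then (PySem.List.slice str_list (some (i + 1)) none, (1 : Int))
      else st1

def solution (str_list : List String) : List String :=
  ((PySem.List.pyRange 0 (PySem.List.len str_list) 1).foldl (solution_body str_list) ([], 0)).1

-- ===== PORT B =====
def solution_alt (str_list : List String) : List String :=
  match PySem.List.index? str_list "l", PySem.List.index? str_list "r" with
  | none, none => []
  | none, some ri => PySem.List.slice str_list (some ((ri : Int) + 1)) none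
  | some li, none => PySem.List.slice str_list none (some (li : Int))
  | some li, some ri =>
      if li < ri then PySem.List.slice str_list none (some (li : Int))
      else PySem.List.slice str_list (some ((ri : Int) + 1)) none

-- ===== PRECONDITION & SPEC =====
def Spec_solution (str_list : List String) (out : List String) : Prop := out = solution_alt str_list
instance (str_list : List String) (out : List String) : Decidable (Spec_solution str_list out) := by unfold Spec_solution; infer_instance

-- ===== CLAIM (what is proved, stated in full; the proofs are below) =====
def Claim_equal_solution : Prop := ∀ (str_list : List String), Dom_solution str_list → Spec_solution str_list (solution str_list)

-- ===== LEMMAS AND PROOFS =====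

-- "is l or r", and the common normal form both programs compute
def pvHit (s : String) : Bool := s == "l" || s == "r"

def pvSpec (l : List String) : List String :=
  match List.findIdx? pvHit l with
  | none => []
  | some k => if l.getD k "" == "l" then l.take k else l.drop (k + 1)

lemma loopA (l : List String) : ∀ (n : Nat), n ≤ l.length →
    (PySem.List.pyRange 0 (n : Int) 1).foldl (solution_body l) ([], 0) =
      (match List.findIdx? pvHit (l.take n) with
       | none => (([] : List String), (0 : Int))
       | some k => (if l.getD k "" == "l" then l.take k else l.drop (k + 1), 1)) := by
  intro n hn
  induction n with
  | zero => simp [PySem.List.pyRange_one_eq_nil]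
  | succ n ih =>
    have hlt : n < l.length := hn
    have hrange : PySem.List.pyRange 0 ((n + 1 : Nat) : Int) 1 =
        PySem.List.pyRange 0 (n : Int) 1 ++ [(n : Int)] := by
      have := PySem.List.pyRange_one_succ_right (a := 0) (b := (n : Int)) (by positivity)
      push_cast
      push_cast at this
      exact this
    rw [hrange, List.foldl_append, ih (le_of_lt hlt)]
    have htake : l.take (n + 1) = l.take n ++ [l[n]] := by
      rw [List.take_add_one, List.getElem?_eq_getElem hlt]
      rfl
    rw [htake, List.findIdx?_append]
    have hget2 : l[n]?.getD "" = l[n] := by rw [List.getElem?_eq_getElem hlt, Option.getD_some]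
    cases hfi : List.findIdx? pvHit (l.take n) with
    | some k =>
        simp only [Option.some_or]
        simp [solution_body]
    | none =>
        simp only [Option.none_or]
        have hlen : (l.take n).length = n := by simp [List.length_take, le_of_lt hlt]
        by_cases hl : l[n] = "l"
        · have hhit : pvHit l[n] = true := by simp [pvHit, hl]
          simp only [List.findIdx?_cons, hhit, List.foldl_cons, List.foldl_nil, hlen]
          have hslice : PySem.List.slice l none (some (n : Int)) = l.take n :=
            PySem.List.slice_to_natCast l n
          simp [solution_body, hget2, hl, hslice]
        · by_cases hr : l[n] = "r"
          · have hhit : pvHit l[n] = true := by simp [pvHit, hr]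
            simp only [List.findIdx?_cons, hhit, List.foldl_cons, List.foldl_nil, hlen]
            have hslice : PySem.List.slice l (some ((n : Int) + 1)) none = l.drop (n + 1) := by
              have hcast : ((n : Int) + 1) = ((n + 1 : Nat) : Int) := by push_cast; ring
              rw [hcast, PySem.List.slice_from_natCast]
            simp [solution_body, hget2, hr, hslice]
          · have hhit : pvHit l[n] = false := by simp [pvHit, hl, hr]
            simp only [List.findIdx?_cons, hhit]
            simp [solution_body, hget2, hl, hr]

lemma A_char (l : List String) : solution l = pvSpec l := by
  unfold solution pvSpec
  rw [PySem.List.len_eq, loopA l l.length le_rfl, List.take_length]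
  cases List.findIdx? pvHit l <;> simp

lemma findIdx_or (l : List String) :
    List.findIdx? pvHit l =
      (match PySem.List.index? l "l", PySem.List.index? l "r" with
       | none, none => none
       | none, some b => some b
       | some a, none => some a
       | some a, some b => some (min a b)) := by
  induction l with
  | nil => simp [PySem.List.index?_eq_idxOf?]
  | cons x xs ih =>
    by_cases hl : x = "l"
    · subst hl
      rw [PySem.List.index?_cons_self,
        PySem.List.index?_cons_of_ne (x := "l") (v := "r") (xs := xs) (by decide)]
      have : pvHit "l" = true := by decide
      rw [List.findIdx?_cons, if_pos this]
      cases PySem.List.index? xs "r" <;> simp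
    · by_cases hr : x = "r"
      · subst hr
        rw [PySem.List.index?_cons_self,
          PySem.List.index?_cons_of_ne (x := "r") (v := "l") (xs := xs) (by decide)]
        have : pvHit "r" = true := by decide
        rw [List.findIdx?_cons, if_pos this]
        cases PySem.List.index? xs "l" <;> simp
      · rw [PySem.List.index?_cons_of_ne (x := x) (v := "l") (xs := xs) (fun h => hl h),
          PySem.List.index?_cons_of_ne (x := x) (v := "r") (xs := xs) (fun h => hr h)]
        have : pvHit x = false := by
          simp [pvHit]
          exact ⟨hl, hr⟩
        rw [List.findIdx?_cons, if_neg (by simp [this]), ih]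
        cases PySem.List.index? xs "l" <;> cases PySem.List.index? xs "r" <;>
          simp [Nat.succ_min_succ]

lemma getD_of_index? {l : List String} {v : String} {k : Nat}
    (h : PySem.List.index? l v = some k) : l.getD k "" = v ∧ l[k]?.getD "" = v := by
  obtain ⟨hk, hv, -⟩ := PySem.List.getElem_of_index?_eq_some h
  constructor
  · rw [List.getD_eq_getElem l "" hk, hv]
  · rw [List.getElem?_eq_getElem hk, Option.getD_some, hv]

lemma B_char (l : List String) : solution_alt l = pvSpec l := by
  unfold solution_alt pvSpec
  rw [findIdx_or l]
  cases hL : PySem.List.index? l "l" with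
  | none =>
    cases hR : PySem.List.index? l "r" with
    | none => rfl
    | some b =>
      obtain ⟨hb, hb'⟩ := getD_of_index? hR
      have hslice : PySem.List.slice l (some ((b : Int) + 1)) none = l.drop (b + 1) := by
        have hcast : ((b : Int) + 1) = ((b + 1 : Nat) : Int) := by push_cast; ring
        rw [hcast, PySem.List.slice_from_natCast]
      simp [hb', hslice]
  | some a =>
    obtain ⟨ha, ha'⟩ := getD_of_index? hL
    cases hR : PySem.List.index? l "r" with
    | none =>
      have hslice : PySem.List.slice l none (some (a : Int)) = l.take a :=
        PySem.List.slice_to_natCast l a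
      simp [ha', hslice]
    | some b =>
      obtain ⟨hb, hb'⟩ := getD_of_index? hR
      have hne : a ≠ b := by
        intro h; rw [h, hb] at ha; exact absurd ha (by decide)
      have hsliceA : PySem.List.slice l none (some (a : Int)) = l.take a :=
        PySem.List.slice_to_natCast l a
      have hsliceB : PySem.List.slice l (some ((b : Int) + 1)) none = l.drop (b + 1) := by
        have hcast : ((b : Int) + 1) = ((b + 1 : Nat) : Int) := by push_cast; ring
        rw [hcast, PySem.List.slice_from_natCast]
      by_cases hab : a < b
      · have hmin : min a b = a := Nat.min_eq_left (le_of_lt hab)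
        simp [hab, hmin, ha', hsliceA]
      · have hba : b < a := lt_of_le_of_ne (Nat.le_of_not_lt hab) (Ne.symm hne)
        have hmin : min a b = b := Nat.min_eq_right (le_of_lt hba)
        simp [hab, hmin, hb', hsliceB]

-- ===== VERDICT (by name: the statement is the Claim_ definition above) =====
theorem solution_spec : Claim_equal_solution := by
  intro l _
  unfold Spec_solution
  rw [A_char, B_char]
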